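-- pv_equiv track=rewrite | github.com/vishaal314/myapp | gdpr_scan_engine/services/code_scanner/scanner.py | _calculate_principle_score
-- ===== SOURCE A (Python) =====
-- from typing import Dict, List, Any, Optional, Tuple
--
-- def _calculate_principle_score(findings: List[Dict[str, Any]]) -> int:
--     """Calculate compliance score for a specific principle based on findings"""
--     if not findings:
--         return 100
--
--     # Count risks by severity
--     high_risk = sum(1 for f in findings if f.get("severity") == "high")
--     medium_risk = sum(1 for f in findings if f.get("severity") == "medium")
--     low_risk = sum(1 for f in findings if f.get("severity") == "low")
--
--     # Calculate score with weighted penalties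
--     base_score = 100
--     high_penalty = 10
--     medium_penalty = 5
--     low_penalty = 2
--
--     return max(0, base_score - (high_risk * high_penalty) -
--              (medium_risk * medium_penalty) - (low_risk * low_penalty))
-- ===== SOURCE B (Python) =====
-- def _calculate_principle_score(findings):
--     """Calculate compliance score for a specific principle based on findings"""
--     if not findings:
--         return 100
--     weights = {"high": 10, "medium": 5, "low": 2}
--     penalty = 0
--     for f in findings:
--         penalty += weights.get(f.get("severity"), 0)
--     return max(0, 100 - penalty)
-- ===== Notes on version B (the rewrite author's own statement) =====
-- stated objective: simpler
-- what changed: B replaces A's three separate severity-counting passes combined by an arithmetic formula with one pass that accumulates a single running penalty looked up in a weight table.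
import Mathlib
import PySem

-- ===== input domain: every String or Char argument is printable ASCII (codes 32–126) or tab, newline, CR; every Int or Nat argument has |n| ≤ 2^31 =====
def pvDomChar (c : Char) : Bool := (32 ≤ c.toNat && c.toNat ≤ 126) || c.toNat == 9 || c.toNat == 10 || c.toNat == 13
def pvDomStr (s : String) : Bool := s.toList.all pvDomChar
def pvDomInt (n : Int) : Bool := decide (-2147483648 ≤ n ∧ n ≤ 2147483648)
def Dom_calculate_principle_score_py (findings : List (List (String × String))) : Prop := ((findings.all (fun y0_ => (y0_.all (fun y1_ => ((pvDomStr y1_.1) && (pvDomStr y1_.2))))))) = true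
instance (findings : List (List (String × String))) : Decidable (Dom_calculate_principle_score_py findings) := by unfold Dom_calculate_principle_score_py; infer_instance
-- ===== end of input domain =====

-- B replaces A's three severity-counting passes with one pass accumulating a single
-- penalty via a weight table; same return value, objective: simpler.

-- ===== PORT A =====
-- sum(1 for f in findings if f.get("severity") == sev)
def pvCountSev (findings : List (List (String × String))) (sev : String) : Int :=
  findings.foldl (fun acc f =>
    if (PySem.Dict.mk f).get? "severity" == some sev then acc + 1 else acc) 0

def calculate_principle_score_py (findings : List (List (String × String))) : Int :=
  if findings = [] then 100
  else
    let high_risk := pvCountSev findings "high"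
    let medium_risk := pvCountSev findings "medium"
    let low_risk := pvCountSev findings "low"
    let base_score : Int := 100
    let high_penalty : Int := 10
    let medium_penalty : Int := 5
    let low_penalty : Int := 2
    max 0 (base_score - (high_risk * high_penalty) -
      (medium_risk * medium_penalty) - (low_risk * low_penalty))

-- ===== PORT B =====
def pvWeights : PySem.Dict String Int :=
  PySem.Dict.ofList [("high", 10), ("medium", 5), ("low", 2)]

def calculate_principle_score_py_alt (findings : List (List (String × String))) : Int :=
  if findings = [] then 100
  else
    -- penalty += weights.get(f.get("severity"), 0); a None key is never in weights → 0
    let penalty := findings.foldl (fun p f =>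
      p + (match (PySem.Dict.mk f).get? "severity" with
           | some s => pvWeights.getD s 0
           | none => 0)) 0
    max 0 (100 - penalty)

-- ===== PRECONDITION & SPEC =====
def Spec_calculate_principle_score_py (findings : List (List (String × String))) (out : Int) : Prop := out = calculate_principle_score_py_alt findings
instance (findings : List (List (String × String))) (out : Int) : Decidable (Spec_calculate_principle_score_py findings out) := by unfold Spec_calculate_principle_score_py; infer_instance

-- ===== CLAIM (what is proved, stated in full; the proofs are below) =====
def Claim_equal_calculate_principle_score_py : Prop := ∀ (findings : List (List (String × String))), Dom_calculate_principle_score_py findings → Spec_calculate_principle_score_py findings (calculate_principle_score_py findings)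

-- ===== LEMMAS AND PROOFS =====

-- B's per-finding weight
def pvW (f : List (String × String)) : Int :=
  match (PySem.Dict.mk f).get? "severity" with
  | some s => pvWeights.getD s 0
  | none => 0

lemma pvWeights_getD (s : String) :
    pvWeights.getD s 0 =
      if s = "high" then 10 else if s = "medium" then 5 else if s = "low" then 2 else 0 := by
  rw [show pvWeights = PySem.Dict.mk [("high", 10), ("medium", 5), ("low", 2)] from rfl,
    PySem.Dict.getD_eq_get?_getD]
  simp only [PySem.Dict.get?_mk_cons]
  split_ifs <;> simp_all [PySem.Dict.get?]

lemma pvMain : ∀ (fs : List (List (String × String))) (p h m l : Int),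
    p = 10 * h + 5 * m + 2 * l →
    fs.foldl (fun p f => p + pvW f) p =
      10 * fs.foldl (fun acc f => if (PySem.Dict.mk f).get? "severity" == some "high" then acc + 1 else acc) h
      + 5 * fs.foldl (fun acc f => if (PySem.Dict.mk f).get? "severity" == some "medium" then acc + 1 else acc) m
      + 2 * fs.foldl (fun acc f => if (PySem.Dict.mk f).get? "severity" == some "low" then acc + 1 else acc) l := by
  intro fs
  induction fs with
  | nil => intro p h m l hp; simpa using hp
  | cons f fs ih =>
    intro p h m l hp
    simp only [List.foldl_cons]
    apply ih
    cases hg : (PySem.Dict.mk f).get? "severity" with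
    | none => simp [pvW, hg, hp]
    | some s =>
      simp only [pvW, hg, pvWeights_getD]
      by_cases h1 : s = "high" <;> by_cases h2 : s = "medium" <;> by_cases h3 : s = "low" <;>
        simp_all <;> ring

-- ===== VERDICT (by name: the statement is the Claim_ definition above) =====
theorem calculate_principle_score_py_spec : Claim_equal_calculate_principle_score_py := by
  intro fs _
  unfold Spec_calculate_principle_score_py calculate_principle_score_py
    calculate_principle_score_py_alt pvCountSev
  by_cases hfs : fs = []
  · simp [hfs]
  · simp only [hfs, if_false]
    have := pvMain fs 0 0 0 0 (by ring)
    simp only [show (fun (p : Int) (f : List (String × String)) =>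
        p + (match (PySem.Dict.mk f).get? "severity" with
             | some s => pvWeights.getD s 0
             | none => 0)) = fun p f => p + pvW f from rfl] at *
    rw [this]
    ring_nf
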